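-- pv_equiv track=rewrite | github.com/Omkarkadam03/Exam_Seat_Arrangement | Exam_Seat_Arrangement/functionality/views.py | generate_seating_plan
-- ===== SOURCE A (Python) =====
-- def generate_seating_plan(student_list, num_classrooms, num_columns, benches_per_column):
--     seating_plan = {}
--     student_index = 0
--     total_capacity_per_classroom = num_columns * benches_per_column  # Calculate capacity for each classroom
--
--     for classroom in range(1, num_classrooms + 1):
--         seats = [[] for _ in range(benches_per_column)]  # Initialize rows for each column
--         bench_number = 1
--
--         # Check if there are enough students remaining
--         if student_index >= len(student_list):
--             break
--
--         # Fill each column vertically within the classroom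
--         for column in range(num_columns):
--             column_benches = ["Empty"] * benches_per_column  # Initialize empty seats for the column
--
--             if column % 2 == 0:  # Odd-numbered columns in ascending order
--                 for bench in range(benches_per_column):
--                     if student_index < len(student_list):
--                         enrollment_number, student_name = student_list[student_index]
--                         column_benches[bench] = f"Bench-{bench_number}: {student_name} ({enrollment_number})"
--                         student_index += 1
--                     bench_number += 1
--             else:  # Even-numbered columns in descending order
--                 for bench in range(benches_per_column - 1, -1, -1):
--                     if student_index < len(student_list):
--                         enrollment_number, student_name = student_list[student_index]
--                         column_benches[bench] = f"Bench-{bench_number}: {student_name} ({enrollment_number})"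
--                         student_index += 1
--                     bench_number += 1
--
--             # Place the filled column in the seats arrangement
--             for row in range(benches_per_column):
--                 if row < len(seats):
--                     seats[row].append(column_benches[row])  # Add each bench to its corresponding row
--
--             # Move to next classroom if this one is full
--             if student_index >= len(student_list) or (column + 1) * benches_per_column >= total_capacity_per_classroom:
--                 break
--
--         # Store the completed classroom arrangement
--         seating_plan[classroom] = seats
--
--     return seating_plan
-- ===== SOURCE B (Python) =====
-- def generate_seating_plan(student_list, num_classrooms, num_columns, benches_per_column):
--     n = len(student_list)
--     bpc = benches_per_column
--     cap = num_columns * bpc if num_columns > 0 and bpc > 0 else 0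
--     plan = {}
--     for c in range(1, num_classrooms + 1):
--         start = (c - 1) * cap
--         if start >= n:
--             break
--         taken = min(cap, n - start)
--         cols = (taken + bpc - 1) // bpc if bpc > 0 else 0
--         seats = []
--         for r in range(bpc):
--             row = []
--             for col in range(cols):
--                 o = r if col % 2 == 0 else bpc - 1 - r
--                 slot = col * bpc + o
--                 if slot < taken:
--                     enr, name = student_list[start + slot]
--                     row.append(f"Bench-{slot + 1}: {name} ({enr})")
--                 else:
--                     row.append("Empty")
--             seats.append(row)
--         plan[c] = seats
--     return plan
-- ===== Notes on version B (the rewrite author's own statement) =====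
-- stated objective: alternative
-- what changed: B replaces A's stateful snake-filling loops (threaded student_index/bench_number counters, per-column buffers mutated in place and appended row by row) with closed-form arithmetic: each classroom's start offset, student count and column count are computed directly, and every seat is derived from its (row, column) coordinates.
import Mathlib
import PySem

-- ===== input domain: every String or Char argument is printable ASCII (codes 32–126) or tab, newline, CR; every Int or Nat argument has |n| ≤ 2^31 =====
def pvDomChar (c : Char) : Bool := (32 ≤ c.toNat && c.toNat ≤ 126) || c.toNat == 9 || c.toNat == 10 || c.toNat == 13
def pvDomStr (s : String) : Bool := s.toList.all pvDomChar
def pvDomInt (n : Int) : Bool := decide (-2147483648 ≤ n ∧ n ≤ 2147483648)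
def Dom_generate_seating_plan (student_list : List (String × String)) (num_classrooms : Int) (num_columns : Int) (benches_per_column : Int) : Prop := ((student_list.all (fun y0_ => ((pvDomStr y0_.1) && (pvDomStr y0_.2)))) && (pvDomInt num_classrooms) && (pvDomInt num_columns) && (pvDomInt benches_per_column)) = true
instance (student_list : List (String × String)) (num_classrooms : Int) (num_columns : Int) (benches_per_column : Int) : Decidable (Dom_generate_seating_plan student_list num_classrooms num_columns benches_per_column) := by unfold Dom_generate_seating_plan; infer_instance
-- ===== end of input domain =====

-- B replaces A's stateful snake loops (student_index / bench_number threading, in-place column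
-- buffers) by closed-form arithmetic: each seat of classroom c is computed directly from its
-- (row, column) coordinates.  Objective: alternative decomposition, same exact output.

-- ===== PORT A =====
-- the f-string "Bench-{bench_number}: {student_name} ({enrollment_number})" (same in A and B)
def pvEntry (enr name : String) (bn : Int) : String :=
  "Bench-" ++ PySem.Int.toStr bn ++ ": " ++ name ++ " (" ++ enr ++ ")"

-- body of one bench visit (identical in A's ascending and descending loops):
-- assign the next student if any remain; bench_number increments either way.
def pvVisit (sl : List (String × String)) (st : List String × Nat × Int) (bench : Int) :
    List String × Nat × Int :=
  let (cb, si, bn) := st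
  if h : si < sl.length then
    (PySem.List.pySetD cb bench (pvEntry (sl[si]).1 (sl[si]).2 bn), si + 1, bn + 1)
  else
    (cb, si, bn + 1)

-- the 'for column in range(num_columns)' loop with its two breaks
def pvColLoop (sl : List (String × String)) (bpc total : Int) :
    List Int → List (List String) → Nat → Int → List (List String) × Nat
  | [], seats, si, _ => (seats, si)
  | column :: rest, seats, si, bn =>
    let cb0 := List.replicate bpc.toNat "Empty"
    let st :=
      if PySem.Int.mod column 2 = 0 then
        (PySem.List.pyRange 0 bpc 1).foldl (pvVisit sl) (cb0, si, bn)
      else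
        (PySem.List.pyRange (bpc - 1) (-1) (-1)).foldl (pvVisit sl) (cb0, si, bn)
    let seats' := (PySem.List.pyRange 0 bpc 1).foldl
      (fun s row =>
        if row < (s.length : Int) then
          PySem.List.pySetD s row ((PySem.List.pyGetD s row []) ++ [PySem.List.pyGetD st.1 row ""])
        else s) seats
    if sl.length ≤ st.2.1 ∨ (column + 1) * bpc ≥ total then (seats', st.2.1)
    else pvColLoop sl bpc total rest seats' st.2.1 st.2.2

-- the 'for classroom in range(1, num_classrooms + 1)' loop with its break
def pvClassLoop (sl : List (String × String)) (ncol bpc total : Int) :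
    List Int → Nat → List (Int × List (List String)) → List (Int × List (List String))
  | [], _, plan => plan
  | classroom :: rest, si, plan =>
    if sl.length ≤ si then plan
    else
      let seats0 := List.replicate bpc.toNat ([] : List String)
      let r := pvColLoop sl bpc total (PySem.List.pyRange 0 ncol 1) seats0 si 1
      pvClassLoop sl ncol bpc total rest r.2 (plan ++ [(classroom, r.1)])

def generate_seating_plan (student_list : List (String × String)) (num_classrooms : Int)
    (num_columns : Int) (benches_per_column : Int) : List (Int × List (List String)) :=
  pvClassLoop student_list num_columns benches_per_column (num_columns * benches_per_column)
    (PySem.List.pyRange 1 (num_classrooms + 1) 1) 0 []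

-- one seat, computed from its (row, column) coordinates
-- ===== PORT B =====
-- one seat, computed from its (row, column) coordinates
def pvCell (sl : List (String × String)) (bpc start taken : Int) (col r : Int) : String :=
  let o := if PySem.Int.mod col 2 = 0 then r else bpc - 1 - r
  let slot := col * bpc + o
  if slot < taken then
    let p := PySem.List.pyGetD sl (start + slot) ("", "")
    pvEntry p.1 p.2 (slot + 1)
  else "Empty"

def pvAltSeats (sl : List (String × String)) (bpc start taken cols : Int) :
    List (List String) :=
  (PySem.List.pyRange 0 bpc 1).map (fun r =>
    (PySem.List.pyRange 0 cols 1).map (fun col => pvCell sl bpc start taken col r))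

def pvAltLoop (sl : List (String × String)) (cap bpc : Int) :
    List Int → List (Int × List (List String)) → List (Int × List (List String))
  | [], plan => plan
  | c :: rest, plan =>
    let start := (c - 1) * cap
    if (sl.length : Int) ≤ start then plan
    else
      let taken := min cap ((sl.length : Int) - start)
      let cols := if 0 < bpc then PySem.Int.floordiv (taken + bpc - 1) bpc else 0
      pvAltLoop sl cap bpc rest (plan ++ [(c, pvAltSeats sl bpc start taken cols)])

def generate_seating_plan_alt (student_list : List (String × String)) (num_classrooms : Int)
    (num_columns : Int) (benches_per_column : Int) : List (Int × List (List String)) :=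
  let cap := if 0 < num_columns ∧ 0 < benches_per_column then num_columns * benches_per_column else 0
  pvAltLoop student_list cap benches_per_column
    (PySem.List.pyRange 1 (num_classrooms + 1) 1) []

-- ===== PRECONDITION & SPEC =====
def Spec_generate_seating_plan (student_list : List (String × String)) (num_classrooms : Int) (num_columns : Int) (benches_per_column : Int) (out : List (Int × List (List String))) : Prop := out = generate_seating_plan_alt student_list num_classrooms num_columns benches_per_column
instance (student_list : List (String × String)) (num_classrooms : Int) (num_columns : Int) (benches_per_column : Int) (out : List (Int × List (List String))) : Decidable (Spec_generate_seating_plan student_list num_classrooms num_columns benches_per_column out) := by unfold Spec_generate_seating_plan; infer_instance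

-- ===== CLAIM (what is proved, stated in full; the proofs are below) =====
def Claim_equal_generate_seating_plan : Prop := ∀ (student_list : List (String × String)) (num_classrooms : Int) (num_columns : Int) (benches_per_column : Int), Dom_generate_seating_plan student_list num_classrooms num_columns benches_per_column → Spec_generate_seating_plan student_list num_classrooms num_columns benches_per_column (generate_seating_plan student_list num_classrooms num_columns benches_per_column)

-- ===== LEMMAS AND PROOFS =====

def pvEntryAt (sl : List (String × String)) (si : Nat) (bn : Int) : String :=
  pvEntry (sl.getD si ("","")).1 (sl.getD si ("","")).2 bn

theorem pv_map_getD {α : Type} (xs : List α) (d : α) :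
    (List.range xs.length).map (fun r => xs.getD r d) = xs := by
  apply List.ext_getElem
  · simp
  · intro i h1 h2
    simp [List.getD_eq_getElem?_getD, List.getElem?_eq_getElem h2]

theorem pv_getD_set_ne {α : Type} (xs : List α) (i r : Nat) (v d : α) (h : ¬ i = r) :
    (xs.set i v).getD r d = xs.getD r d := by
  simp [List.getD_eq_getElem?_getD, List.getElem?_set, h]

theorem pv_getD_set_self {α : Type} (xs : List α) (i : Nat) (v d : α) (h : i < xs.length) :
    (xs.set i v).getD i d = v := by
  simp [List.getD_eq_getElem?_getD, List.getElem?_set, h]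

theorem pv_visit_lt (sl : List (String × String)) (cb : List String) (si : Nat) (bn : Int)
    (b : Int) (h : si < sl.length) :
    pvVisit sl (cb, si, bn) b =
      (PySem.List.pySetD cb b (pvEntryAt sl si bn), si + 1, bn + 1) := by
  simp [pvVisit, h, pvEntryAt, List.getD_eq_getElem?_getD, List.getElem?_eq_getElem h]

theorem pv_visit_ge (sl : List (String × String)) (cb : List String) (si : Nat) (bn : Int)
    (b : Int) (h : ¬ si < sl.length) :
    pvVisit sl (cb, si, bn) b = (cb, si, bn + 1) := by
  simp [pvVisit, h]

theorem pv_asc (sl : List (String × String)) (d : Nat) :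
    ∀ (k a : Nat) (cb : List String) (si : Nat) (bn : Int), a + k = d → cb.length = d →
      si ≤ sl.length →
    (PySem.List.pyRange (a : Int) (d : Int) 1).foldl (pvVisit sl) (cb, si, bn) =
    ((List.range d).map (fun r =>
        if a ≤ r ∧ si + (r - a) < sl.length then pvEntryAt sl (si + (r - a)) (bn + ((r : Int) - (a : Int)))
        else cb.getD r ""),
      min sl.length (si + k), bn + (k : Int)) := by
  intro k
  induction k with
  | zero =>
    intro a cb si bn hak hcb hsi
    rw [PySem.List.pyRange_one_eq_nil (by omega)]
    simp only [List.foldl_nil]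
    refine Prod.ext ?_ (Prod.ext ?_ ?_) <;> simp only
    · have h1 : ∀ r ∈ List.range d,
          (if a ≤ r ∧ si + (r - a) < sl.length then pvEntryAt sl (si + (r - a)) (bn + ((r:Int) - (a:Int)))
           else cb.getD r "") = cb.getD r "" := by
        intro r hr; simp only [List.mem_range] at hr
        rw [if_neg (by omega)]
      rw [List.map_congr_left h1, ← hcb, pv_map_getD]
    · omega
    · simp
  | succ k ih =>
    intro a cb si bn hak hcb hsi
    rw [PySem.List.pyRange_one_cons (by omega)]
    simp only [List.foldl_cons]
    have hcast : ((a : Int) + 1) = ((a + 1 : Nat) : Int) := by push_cast; ring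
    by_cases h : si < sl.length
    · rw [pv_visit_lt sl cb si bn _ h, hcast, PySem.List.pySetD_natCast,
        ih (a+1) _ (si+1) (bn+1) (by omega) (by simp [hcb]) (by omega)]
      refine Prod.ext ?_ (Prod.ext ?_ ?_) <;> simp only
      · apply List.map_congr_left; intro r hr
        simp only [List.mem_range] at hr
        rcases Nat.lt_trichotomy r a with hra | hra | hra
        · rw [if_neg (by omega), if_neg (by omega), pv_getD_set_ne _ _ _ _ _ (by omega)]
        · subst hra
          rw [if_neg (by omega), if_pos (by omega), pv_getD_set_self _ _ _ _ (by omega)]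
          simp [pvEntryAt]
        · by_cases h2 : si + (r - a) < sl.length
          · rw [if_pos (by omega), if_pos (by omega)]
            have e1 : si + 1 + (r - (a + 1)) = si + (r - a) := by omega
            have e2 : bn + 1 + ((r:Int) - ((a+1:Nat):Int)) = bn + ((r:Int) - (a:Int)) := by
              push_cast; ring
            rw [e1, e2]
          · rw [if_neg (by omega), if_neg (by omega), pv_getD_set_ne _ _ _ _ _ (by omega)]
      · omega
      · push_cast; ring
    · rw [pv_visit_ge sl cb si bn _ h, hcast, ih (a+1) _ si (bn+1) (by omega) hcb hsi]
      refine Prod.ext ?_ (Prod.ext ?_ ?_) <;> simp only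
      · apply List.map_congr_left; intro r hr
        simp only [List.mem_range] at hr
        rw [if_neg (by omega), if_neg (by omega)]
      · omega
      · push_cast; ring

theorem pv_desc (sl : List (String × String)) :
    ∀ (k : Nat) (cb : List String) (si : Nat) (bn : Int), k ≤ cb.length →
      si ≤ sl.length →
    (PySem.List.pyRange ((k : Int) - 1) (-1) (-1)).foldl (pvVisit sl) (cb, si, bn) =
    ((List.range cb.length).map (fun r =>
        if r < k ∧ si + (k - 1 - r) < sl.length then
          pvEntryAt sl (si + (k - 1 - r)) (bn + ((k : Int) - 1 - (r : Int)))
        else cb.getD r ""),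
      min sl.length (si + k), bn + (k : Int)) := by
  intro k
  induction k with
  | zero =>
    intro cb si bn hk hsi
    rw [PySem.List.pyRange_neg_one_eq_nil (by omega)]
    simp only [List.foldl_nil]
    refine Prod.ext ?_ (Prod.ext ?_ ?_) <;> simp only
    · have h1 : ∀ r ∈ List.range cb.length,
          (if r < 0 ∧ si + (0 - 1 - r) < sl.length then
            pvEntryAt sl (si + (0 - 1 - r)) (bn + (((0:Nat) : Int) - 1 - (r:Int)))
           else cb.getD r "") = cb.getD r "" := by
        intro r hr; rw [if_neg (by omega)]
      rw [List.map_congr_left h1, pv_map_getD]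
    · omega
    · simp
  | succ k ih =>
    intro cb si bn hk hsi
    have hc : (((k+1 : Nat) : Int) - 1) = (k : Int) := by push_cast; ring
    rw [hc, PySem.List.pyRange_neg_one_cons (by omega)]
    simp only [List.foldl_cons]
    have hc2 : ((k : Int) - 1) = ((k : Int) - 1) := rfl
    by_cases h : si < sl.length
    · rw [pv_visit_lt sl cb si bn _ h, PySem.List.pySetD_natCast,
        ih _ (si+1) (bn+1) (by simp; omega) (by omega)]
      refine Prod.ext ?_ (Prod.ext ?_ ?_) <;> simp only [List.length_set]
      · apply List.map_congr_left; intro r hr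
        simp only [List.mem_range] at hr
        rcases Nat.lt_trichotomy r k with hrk | hrk | hrk
        · by_cases h2 : si + (k + 1 - 1 - r) < sl.length
          · rw [if_pos (by omega), if_pos (by omega)]
            have e1 : si + 1 + (k - 1 - r) = si + (k + 1 - 1 - r) := by omega
            rw [e1]; congr 1; ring
          · rw [if_neg (by omega), if_neg (by omega), pv_getD_set_ne _ _ _ _ _ (by omega)]
        · subst hrk
          rw [if_neg (by omega), if_pos (by omega), pv_getD_set_self _ _ _ _ (by omega)]
          have e1 : si + (r + 1 - 1 - r) = si := by omega
          rw [e1]; congr 1; ring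
        · rw [if_neg (by omega), if_neg (by omega), pv_getD_set_ne _ _ _ _ _ (by omega)]
      · omega
      · push_cast; ring
    · rw [pv_visit_ge sl cb si bn _ h, ih _ si (bn+1) (by omega) hsi]
      refine Prod.ext ?_ (Prod.ext ?_ ?_) <;> simp only
      · apply List.map_congr_left; intro r hr
        simp only [List.mem_range] at hr
        rw [if_neg (by omega), if_neg (by omega)]
      · omega
      · push_cast; ring

theorem pv_rows (cb : List String) (d : Nat) :
    ∀ (k a : Nat) (seats : List (List String)), a + k = d → seats.length = d →
    (PySem.List.pyRange (a : Int) (d : Int) 1).foldl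
      (fun s row =>
        if row < (s.length : Int) then
          PySem.List.pySetD s row ((PySem.List.pyGetD s row []) ++ [PySem.List.pyGetD cb row ""])
        else s) seats =
    (List.range d).map (fun r =>
      if r < a then seats.getD r []
      else seats.getD r [] ++ [PySem.List.pyGetD cb (r : Int) ""]) := by
  intro k
  induction k with
  | zero =>
    intro a seats hak hlen
    rw [PySem.List.pyRange_one_eq_nil (by omega)]
    simp only [List.foldl_nil]
    have h1 : ∀ r ∈ List.range d,
        (if r < a then seats.getD r []
         else seats.getD r [] ++ [PySem.List.pyGetD cb (r:Int) ""]) = seats.getD r [] := by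
      intro r hr; simp only [List.mem_range] at hr
      rw [if_pos (by omega)]
    rw [List.map_congr_left h1, ← hlen, pv_map_getD]
  | succ k ih =>
    intro a seats hak hlen
    rw [PySem.List.pyRange_one_cons (by omega)]
    simp only [List.foldl_cons]
    rw [if_pos (by exact_mod_cast (by omega : (a:Int) < (seats.length : Int)))]
    rw [PySem.List.pySetD_natCast, PySem.List.pyGetD_natCast]
    have hcast : ((a : Int) + 1) = ((a + 1 : Nat) : Int) := by push_cast; ring
    rw [hcast, ih (a+1) _ (by omega) (by simp; omega)]
    apply List.map_congr_left; intro r hr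
    simp only [List.mem_range] at hr
    rcases Nat.lt_trichotomy r a with hra | hra | hra
    · rw [if_pos (by omega), if_pos hra, pv_getD_set_ne _ _ _ _ _ (by omega)]
    · subst hra
      rw [if_pos (by omega), if_neg (by omega), pv_getD_set_self _ _ _ _ (by omega)]
    · rw [if_neg (by omega), if_neg (by omega), pv_getD_set_ne _ _ _ _ _ (by omega)]

def pvStage (sl : List (String × String)) (d s0 taken col : Nat) : List (List String) :=
  (List.range d).map (fun (r : Nat) => (List.range col).map (fun (c : Nat) =>
    pvCell sl (d : Int) (s0 : Int) (taken : Int) ((c : Nat) : Int) ((r : Nat) : Int)))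

theorem pv_cell (sl : List (String × String)) (d m : Nat) (hd : 0 < d) (s0 c r : Nat)
    (hc : c < m) (hr : r < d) (hs0 : s0 ≤ sl.length) :
    pvCell sl (d : Int) (s0 : Int) ((min (m*d) (sl.length - s0) : Nat) : Int) (c : Int) (r : Int) =
    (let o := if c % 2 = 0 then r else d - 1 - r
     if s0 + (c*d + o) < sl.length then pvEntryAt sl (s0 + (c*d + o)) (((c*d + o : Nat) : Int) + 1)
     else "Empty") := by
  have hmod : PySem.Int.mod (c : Int) 2 = ((c % 2 : Nat) : Int) := by
    exact_mod_cast PySem.Int.mod_natCast c 2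
  simp only [pvCell, hmod]
  set o : Nat := if c % 2 = 0 then r else d - 1 - r with ho
  have hoeq : (if ((c % 2 : Nat) : Int) = 0 then (r : Int) else (d : Int) - 1 - (r : Int)) = (o : Nat) := by
    by_cases hp : c % 2 = 0
    · simp [hp, ho]
    · have : ¬ ((c % 2 : Nat) : Int) = 0 := by omega
      rw [if_neg this, ho, if_neg hp]
      omega
  rw [hoeq]
  have hslot : (c : Int) * (d : Int) + ((o : Nat) : Int) = ((c*d + o : Nat) : Int) := by push_cast; ring
  rw [hslot]
  have hocap : c*d + o < m*d := by
    have h1 : o ≤ d - 1 := by by_cases hp : c % 2 = 0 <;> simp [ho, hp] <;> omega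
    have h2 : (c+1)*d ≤ m*d := Nat.mul_le_mul_right d (by omega)
    have h3 : (c+1)*d = c*d + d := by ring
    omega
  by_cases hlt : s0 + (c*d + o) < sl.length
  · rw [if_pos (by push_cast; omega), if_pos hlt]
    have hidx : ((s0 : Int) + ((c*d + o : Nat) : Int)) = ((s0 + (c*d + o) : Nat) : Int) := by push_cast; ring
    rw [hidx, PySem.List.pyGetD_natCast]
    rfl
  · rw [if_neg (by push_cast; omega), if_neg hlt]

theorem pv_col (sl : List (String × String)) (d m : Nat) (hd : 0 < d) (hm : 0 < m)
    (s0 : Nat) (hs0 : s0 < sl.length) :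
    ∀ (j col : Nat), j = m - col → col < m → s0 + col * d < sl.length →
    pvColLoop sl (d : Int) ((m : Int) * (d : Int)) (PySem.List.pyRange (col : Int) (m : Int) 1)
      (pvStage sl d s0 (min (m*d) (sl.length - s0)) col) (s0 + col * d) ((col : Int) * (d : Int) + 1)
    = (pvStage sl d s0 (min (m*d) (sl.length - s0))
         ((min (m*d) (sl.length - s0) + d - 1) / d),
       s0 + min (m*d) (sl.length - s0)) := by
  set n := sl.length with hn
  set takenN := min (m*d) (sl.length - s0) with htk
  intro j
  induction j with
  | zero => intro col hj hcol hsio; omega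
  | succ j ih =>
    intro col hj hcol hsio
    rw [PySem.List.pyRange_one_cons (by omega)]
    simp only [pvColLoop]
    -- the snake fill of this column
    have htoNat : ((d : Int)).toNat = d := by simp
    have hcb0 : (List.replicate ((d:Int)).toNat "Empty").length = d := by simp
    have hsi_le : s0 + col * d ≤ sl.length := by omega
    have hasc := pv_asc sl d d 0 (List.replicate ((d:Int)).toNat "Empty")
      (s0 + col * d) ((col:Int)*(d:Int)+1) (by omega) hcb0 hsi_le
    have hdesc := pv_desc sl d (List.replicate ((d:Int)).toNat "Empty")
      (s0 + col * d) ((col:Int)*(d:Int)+1) (by simp) hsi_le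
    have hcast0 : ((0:Nat) : Int) = (0 : Int) := rfl
    rw [hcast0] at hasc
    -- characterize cb, independent of parity, as a function of physical row
    have hcbchar :
        (if PySem.Int.mod (col : Int) 2 = 0 then
          (PySem.List.pyRange 0 (d:Int) 1).foldl (pvVisit sl)
            (List.replicate ((d:Int)).toNat "Empty", s0 + col * d, (col:Int)*(d:Int)+1)
         else
          (PySem.List.pyRange ((d:Int) - 1) (-1) (-1)).foldl (pvVisit sl)
            (List.replicate ((d:Int)).toNat "Empty", s0 + col * d, (col:Int)*(d:Int)+1))
        = ((List.range d).map (fun (r : Nat) =>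
             pvCell sl (d:Int) (s0:Int) (takenN : Int) (col : Int) ((r : Nat) : Int)),
           min sl.length (s0 + col * d + d), (col:Int)*(d:Int)+1+(d:Int)) := by
      have hmod : PySem.Int.mod (col : Int) 2 = ((col % 2 : Nat) : Int) := by
        exact_mod_cast PySem.Int.mod_natCast col 2
      by_cases hp : col % 2 = 0
      · rw [if_pos (by rw [hmod]; exact_mod_cast congrArg (Nat.cast : Nat → Int) hp), hasc]
        refine Prod.ext ?_ rfl
        simp only
        apply List.map_congr_left; intro r hr
        simp only [List.mem_range] at hr
        rw [pv_cell sl d m hd s0 col r hcol hr (by omega)]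
        simp only [if_pos hp]
        by_cases h2 : s0 + col * d + r < sl.length
        · rw [if_pos (by omega), if_pos (by omega)]
          have e1 : s0 + col * d + (r - 0) = s0 + (col * d + r) := by omega
          rw [e1]; congr 1; push_cast; ring
        · rw [if_neg (by omega), if_neg (by omega), List.getD_replicate _ (by simpa using hr)]
      · rw [if_neg (by rw [hmod]; omega)]
        have hdm1 : ((d : Int) - 1) = (((d : Nat) : Int) - 1) := rfl
        rw [hdesc]
        refine Prod.ext ?_ ?_
        · simp only [List.length_replicate, htoNat]
          apply List.map_congr_left; intro r hr
          simp only [List.mem_range] at hr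
          rw [pv_cell sl d m hd s0 col r hcol hr (by omega)]
          simp only [if_neg hp]
          by_cases h2 : s0 + col * d + (d - 1 - r) < sl.length
          · rw [if_pos (by omega), if_pos (by omega)]
            have e1 : s0 + col * d + (d - 1 - r) = s0 + (col * d + (d - 1 - r)) := by omega
            rw [e1]; congr 1; push_cast; omega
          · rw [if_neg (by omega), if_neg (by omega), List.getD_replicate _ (by simpa using hr)]
        · rfl
    have h1 : (if PySem.Int.mod (col : Int) 2 = 0 then
          (PySem.List.pyRange 0 (d:Int) 1).foldl (pvVisit sl)
            (List.replicate ((d:Int)).toNat "Empty", s0 + col * d, (col:Int)*(d:Int)+1)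
         else
          (PySem.List.pyRange ((d:Int) - 1) (-1) (-1)).foldl (pvVisit sl)
            (List.replicate ((d:Int)).toNat "Empty", s0 + col * d, (col:Int)*(d:Int)+1)).1
        = (List.range d).map (fun (r : Nat) =>
             pvCell sl (d:Int) (s0:Int) (takenN : Int) (col : Int) ((r : Nat) : Int)) := by
      rw [hcbchar]
    have h2 : (if PySem.Int.mod (col : Int) 2 = 0 then
          (PySem.List.pyRange 0 (d:Int) 1).foldl (pvVisit sl)
            (List.replicate ((d:Int)).toNat "Empty", s0 + col * d, (col:Int)*(d:Int)+1)
         else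
          (PySem.List.pyRange ((d:Int) - 1) (-1) (-1)).foldl (pvVisit sl)
            (List.replicate ((d:Int)).toNat "Empty", s0 + col * d, (col:Int)*(d:Int)+1)).2.1
        = min sl.length (s0 + col * d + d) := by
      rw [hcbchar]
    have h3 : (if PySem.Int.mod (col : Int) 2 = 0 then
          (PySem.List.pyRange 0 (d:Int) 1).foldl (pvVisit sl)
            (List.replicate ((d:Int)).toNat "Empty", s0 + col * d, (col:Int)*(d:Int)+1)
         else
          (PySem.List.pyRange ((d:Int) - 1) (-1) (-1)).foldl (pvVisit sl)
            (List.replicate ((d:Int)).toNat "Empty", s0 + col * d, (col:Int)*(d:Int)+1)).2.2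
        = (col:Int)*(d:Int)+1+(d:Int) := by
      rw [hcbchar]
    rw [h1, h2, h3]
    -- the row-append loop turns stage col into stage (col+1)
    have hstlen : (pvStage sl d s0 takenN col).length = d := by simp [pvStage]
    have hrows := pv_rows ((List.range d).map (fun (r : Nat) =>
        pvCell sl (d:Int) (s0:Int) (takenN : Int) (col : Int) ((r : Nat) : Int))) d d 0
        (pvStage sl d s0 takenN col) (by omega) hstlen
    rw [hcast0] at hrows
    rw [hrows]
    have hstage :
        (List.range d).map (fun r =>
          if r < 0 then (pvStage sl d s0 takenN col).getD r []
          else (pvStage sl d s0 takenN col).getD r [] ++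
            [PySem.List.pyGetD ((List.range d).map (fun (r : Nat) =>
               pvCell sl (d:Int) (s0:Int) (takenN : Int) (col : Int) ((r : Nat) : Int))) (r : Int) ""])
        = pvStage sl d s0 takenN (col + 1) := by
      unfold pvStage
      apply List.map_congr_left; intro r hr
      simp only [List.mem_range] at hr
      rw [if_neg (by omega)]
      rw [PySem.List.pyGetD_natCast]
      have hg1 : ∀ (f : Nat → List String), ((List.range d).map f).getD r [] = f r := by
        intro f
        simp [List.getD_eq_getElem?_getD, List.getElem?_map, List.getElem?_range, hr]
      have hg2 : ∀ (f : Nat → String), ((List.range d).map f).getD r "" = f r := by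
        intro f
        simp [List.getD_eq_getElem?_getD, List.getElem?_map, List.getElem?_range, hr]
      rw [hg1, hg2, List.range_succ, List.map_append]
      rfl
    rw [hstage]
    -- the break test
    have hmul1 : (col+1)*d = col*d + d := by ring
    have hmul2 : (col+1)*d ≤ m*d := Nat.mul_le_mul_right d (by omega)
    have hmul3 : col*d < m*d := by omega
    by_cases hbk : sl.length ≤ min sl.length (s0 + col * d + d) ∨
        ((col:Int) + 1) * (d:Int) ≥ (m:Int) * (d:Int)
    · rw [if_pos hbk]
      have hup : takenN ≤ (col+1)*d := by
        rcases hbk with hbk | hbk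
        · omega
        · have : m * d ≤ (col+1) * d := by exact_mod_cast (by push_cast at hbk ⊢; omega : ((m*d : Nat) : Int) ≤ (((col+1)*d : Nat) : Int))
          omega
      have hlow : col*d < takenN := by omega
      have hcols : (takenN + d - 1) / d = col + 1 := by
        rw [Nat.div_eq_iff hd]
        omega
      rw [hcols]
      refine Prod.ext rfl ?_
      simp only
      rcases hbk with hbk | hbk
      · omega
      · have : m * d ≤ (col+1) * d := by exact_mod_cast (by push_cast at hbk ⊢; omega : ((m*d : Nat) : Int) ≤ (((col+1)*d : Nat) : Int))
        have hm1 : col + 1 = m := by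
          by_contra hne
          have : col + 1 < m := by omega
          have := (Nat.mul_lt_mul_right hd).mpr this
          omega
        omega
    · rw [if_neg hbk]
      push_neg at hbk
      obtain ⟨hbk1, hbk2⟩ := hbk
      have hlt : s0 + col * d + d < sl.length := by omega
      have hcm : col + 1 < m := by
        by_contra hne
        have hcm1 : col + 1 = m := by omega
        apply absurd hbk2
        push_neg
        rw [← hcm1]
        push_cast
        omega
      have e1 : min sl.length (s0 + col * d + d) = s0 + (col+1) * d := by omega
      have e2 : ((col:Int) + 1) = (((col+1 : Nat)) : Int) := by push_cast; ring
      have e3 : (col:Int)*(d:Int)+1+(d:Int) = (((col+1:Nat)):Int)*(d:Int)+1 := by push_cast; ring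
      rw [e1, e2, e3]
      exact ih (col+1) (by omega) (by omega) (by omega)

theorem pv_class (sl : List (String × String)) (nc ncol bpc : Int) :
    ∀ (k : Nat) (c : Int) (plan : List (Int × List (List String))), 1 ≤ c →
      k = (nc + 1 - c).toNat →
    pvClassLoop sl ncol bpc (ncol * bpc) (PySem.List.pyRange c (nc + 1) 1)
      (min sl.length ((c - 1) * (if 0 < ncol ∧ 0 < bpc then ncol * bpc else 0)).toNat) plan
    = pvAltLoop sl (if 0 < ncol ∧ 0 < bpc then ncol * bpc else 0) bpc
        (PySem.List.pyRange c (nc + 1) 1) plan := by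
  set capI : Int := if 0 < ncol ∧ 0 < bpc then ncol * bpc else 0 with hcapI
  have hcapnn : 0 ≤ capI := by
    rw [hcapI]; split_ifs with h
    · exact le_of_lt (mul_pos h.1 h.2)
    · exact le_refl 0
  intro k
  induction k with
  | zero =>
    intro c plan hc hk
    rw [PySem.List.pyRange_one_eq_nil (by omega)]
    rfl
  | succ k ih =>
    intro c plan hc hk
    rw [PySem.List.pyRange_one_cons (by omega)]
    simp only [pvClassLoop, pvAltLoop]
    have hstartnn : 0 ≤ (c - 1) * capI := mul_nonneg (by omega) hcapnn
    by_cases hstop : sl.length ≤ min sl.length ((c - 1) * capI).toNat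
    · rw [if_pos hstop, if_pos (by omega)]
    · rw [if_neg hstop, if_neg (by omega)]
      have hsi : min sl.length ((c - 1) * capI).toNat = ((c - 1) * capI).toNat := by omega
      have hsilt : ((c - 1) * capI).toNat < sl.length := by omega
      rw [hsi]
      -- one full classroom: A's snake loops produce exactly B's arithmetic grid
      have hkey : pvColLoop sl bpc (ncol * bpc) (PySem.List.pyRange 0 ncol 1)
          (List.replicate bpc.toNat ([] : List String)) (((c - 1) * capI).toNat) 1
          = (pvAltSeats sl bpc ((c - 1) * capI)
               (min capI ((sl.length : Int) - (c - 1) * capI))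
               (if 0 < bpc then
                  PySem.Int.floordiv (min capI ((sl.length : Int) - (c - 1) * capI) + bpc - 1) bpc
                else 0),
             (min sl.length (c * capI).toNat : Nat)) := by
        by_cases hpos : 0 < ncol ∧ 0 < bpc
        · obtain ⟨hpn, hpb⟩ := hpos
          set m := ncol.toNat with hm'
          set d := bpc.toNat with hd'
          have hncol : ncol = (m : Int) := (Int.toNat_of_nonneg (by omega)).symm
          have hbpc : bpc = (d : Int) := (Int.toNat_of_nonneg (by omega)).symm
          have hdpos : 0 < d := by omega
          have hmpos : 0 < m := by omega
          have hcap : capI = ((m * d : Nat) : Int) := by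
            rw [hcapI, if_pos ⟨hpn, hpb⟩, hncol, hbpc]; push_cast; ring
          set s0 := ((c - 1) * capI).toNat with hs0'
          have hs0lt : s0 < sl.length := hsilt
          set takenN := min (m*d) (sl.length - s0) with htk'
          set colsN := (takenN + d - 1) / d with hcols'
          have hstage0 : List.replicate bpc.toNat ([] : List String)
              = pvStage sl d s0 takenN 0 := by
            simp [pvStage, List.map_const']
            omega
          have hcol0 := pv_col sl d m hdpos hmpos s0 hs0lt m 0 (by omega) hmpos
            (by simpa using hs0lt)
          simp only [Nat.cast_zero, Nat.zero_mul, Nat.add_zero, zero_mul, zero_add] at hcol0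
          rw [hncol, hbpc, hstage0, hcol0]
          -- now identify B's values
          have hstart : (c - 1) * capI = ((s0 : Nat) : Int) := (Int.toNat_of_nonneg hstartnn).symm
          have htakeI : min capI ((sl.length : Int) - (c - 1) * capI) = ((takenN : Nat) : Int) := by
            rw [hstart, hcap]; push_cast; omega
          have hcolsI : (if 0 < (d : Int) then
              PySem.Int.floordiv (((takenN : Nat) : Int) + (d : Int) - 1) (d : Int)
            else 0) = ((colsN : Nat) : Int) := by
            rw [if_pos (by exact_mod_cast hdpos)]
            have e : ((takenN : Nat) : Int) + (d : Int) - 1 = ((takenN + d - 1 : Nat) : Int) := by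
              push_cast; omega
            rw [e, PySem.Int.floordiv_natCast, hcols']
          rw [htakeI, hcolsI, hstart]
          refine Prod.ext ?_ ?_
          · simp only [pvAltSeats, pvStage, PySem.List.pyRange_zero_nat, List.map_map]
            rfl
          · simp only
            have hsplit : c * capI = (c - 1) * capI + capI := by ring
            rw [hsplit, hstart, hcap]
            omega
        · -- degenerate classroom: no student is ever seated
          have hcap0 : capI = 0 := by rw [hcapI, if_neg hpos]
          have hs00 : ((c - 1) * capI).toNat = 0 := by rw [hcap0]; simp
          rw [hs00]
          have htake0 : min capI ((sl.length : Int) - (c - 1) * capI) = 0 := by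
            rw [hcap0]; simp
          have hsi0 : min sl.length (c * capI).toNat = 0 := by rw [hcap0]; simp
          rw [htake0, hsi0]
          by_cases hb : 0 < bpc
          · -- then num_columns ≤ 0: the column loop never runs
            have hnc : ncol ≤ 0 := by
              by_contra hx; exact hpos ⟨by omega, hb⟩
            rw [PySem.List.pyRange_one_eq_nil (by omega)]
            have hbpc : bpc = ((bpc.toNat : Nat) : Int) := (Int.toNat_of_nonneg (by omega)).symm
            have hcolsv : (if 0 < bpc then
                PySem.Int.floordiv ((0 : Int) + bpc - 1) bpc else 0) = 0 := by
              rw [if_pos hb, hbpc]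
              have e : (0 : Int) + ((bpc.toNat : Nat) : Int) - 1 = ((bpc.toNat - 1 : Nat) : Int) := by
                push_cast; omega
              rw [e, PySem.Int.floordiv_natCast]
              have : (bpc.toNat - 1) / bpc.toNat = 0 := Nat.div_eq_of_lt (by omega)
              rw [this]; rfl
            rw [hcolsv]
            simp only [pvColLoop, pvAltSeats]
            refine Prod.ext ?_ rfl
            rw [show PySem.List.pyRange 0 0 1 = [] from PySem.List.pyRange_one_eq_nil (le_refl 0)]
            simp only [List.map_nil]
            rw [PySem.List.pyRange_zero]
            apply List.ext_getElem <;> simp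
          · -- benches_per_column ≤ 0: each classroom stores an empty grid
            have hbv : bpc ≤ 0 := by omega
            have hstart0 : (c - 1) * capI = 0 := by rw [hcap0]; ring
            have hseats : pvAltSeats sl bpc 0 0 (if 0 < bpc then
                PySem.Int.floordiv ((0:Int) + bpc - 1) bpc else 0) = [] := by
              simp only [pvAltSeats]
              rw [show PySem.List.pyRange 0 bpc 1 = [] from PySem.List.pyRange_one_eq_nil hbv]
              rfl
            rw [hstart0, hseats]
            have hrep : List.replicate bpc.toNat ([] : List String) = [] := by
              have : bpc.toNat = 0 := by omega
              rw [this]; rfl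
            rw [hrep]
            by_cases hncol : 0 < ncol
            · rw [PySem.List.pyRange_one_cons (by omega)]
              simp only [pvColLoop]
              rw [if_pos (by decide : PySem.Int.mod (0 : Int) 2 = 0)]
              rw [show PySem.List.pyRange 0 bpc 1 = [] from PySem.List.pyRange_one_eq_nil hbv]
              simp only [List.foldl_nil]
              rw [if_pos (Or.inr (by nlinarith : (0 + 1) * bpc ≥ ncol * bpc))]
            · rw [PySem.List.pyRange_one_eq_nil (by omega)]
              rfl
      rw [hkey]
      have e1 : c + 1 - 1 = c := by ring
      have ihx := ih (c + 1) (plan ++ [(c, pvAltSeats sl bpc ((c - 1) * capI)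
               (min capI ((sl.length : Int) - (c - 1) * capI))
               (if 0 < bpc then
                  PySem.Int.floordiv (min capI ((sl.length : Int) - (c - 1) * capI) + bpc - 1) bpc
                else 0))]) (by omega) (by omega)
      rw [e1] at ihx
      exact ihx


theorem pv_main (sl : List (String × String)) (nc ncol bpc : Int) :
    generate_seating_plan sl nc ncol bpc = generate_seating_plan_alt sl nc ncol bpc := by
  unfold generate_seating_plan generate_seating_plan_alt
  have h := pv_class sl nc ncol bpc ((nc + 1 - 1).toNat) 1 [] (by omega) rfl
  simpa using h

-- ===== VERDICT (by name: the statement is the Claim_ definition above) =====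
theorem generate_seating_plan_spec : Claim_equal_generate_seating_plan := by
  intro sl nc ncol bpc _
  unfold Spec_generate_seating_plan
  exact pv_main sl nc ncol bpc
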